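-- pv_equiv track=rewrite | github.com/garnaud/adventcode-2025 | 02A/advent_2.py | is_invalid_with_set
-- ===== SOURCE A (Python) =====
-- def is_invalid_with_set(id: str) -> bool:
--     id_length = len(id)
--
--     for number_of_parts in range(2, id_length + 1):
--         if id_length % number_of_parts == 0:
--             # The id can be splitted to equal parts
--             part_length = int(id_length / number_of_parts)
--
--             first_part = id[:part_length]
--             all_different_parts = set({first_part})
--
--             for other_part_index in range(1, number_of_parts):
--                 # We isolated first part, now we compare to other part of the id
--                 other_part = id[
--                     part_length * other_part_index : part_length
--                     * (other_part_index + 1)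
--                 ]
--                 all_different_parts.add(other_part)
--             if len(all_different_parts) == 1:
--                 return True
--
--     return False
-- ===== SOURCE B (Python) =====
-- def is_invalid_with_set(id: str) -> bool:
--     n = len(id)
--     for p in range(1, n // 2 + 1):
--         if n % p == 0 and id[p:] == id[:-p]:
--             return True
--     return False
-- ===== Notes on version B (the rewrite author's own statement) =====
-- stated objective: faster
-- what changed: Instead of iterating over part counts and collecting all equal-length parts into a set per candidate, B iterates over candidate part lengths p and does a single self-overlap comparison id[p:] == id[:-p] (the classical periodicity test), which detects a period p dividing len(id) with one string compare and no slicing into parts or set building.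
import Mathlib
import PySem

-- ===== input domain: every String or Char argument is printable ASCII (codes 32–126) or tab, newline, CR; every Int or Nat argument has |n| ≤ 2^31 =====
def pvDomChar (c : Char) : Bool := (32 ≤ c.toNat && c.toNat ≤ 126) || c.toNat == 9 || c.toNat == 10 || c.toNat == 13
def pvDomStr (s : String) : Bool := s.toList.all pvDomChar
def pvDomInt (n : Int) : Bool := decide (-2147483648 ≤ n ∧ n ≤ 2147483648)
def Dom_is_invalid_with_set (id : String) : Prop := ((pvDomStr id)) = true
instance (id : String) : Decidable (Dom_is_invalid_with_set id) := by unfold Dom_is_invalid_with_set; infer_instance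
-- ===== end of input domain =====

-- B replaces A's per-divisor "slice into k equal parts and collect them in a set" by a single
-- self-overlap comparison id[p:] == id[:-p] per candidate part length p (classical periodicity test).

-- ===== PORT A =====
-- the set of parts built by A's inner loop for a candidate (part_length p, number_of_parts k)
def pvPartsSet (l : List Char) (p k : Int) : PySem.Set (List Char) :=
  (PySem.List.pyRange 1 k 1).foldl
    (fun acc i => PySem.Set.add acc (PySem.List.slice l (some (p * i)) (some (p * (i + 1)))))
    (PySem.Set.ofList [PySem.List.slice l none (some p)])

def pvALoop (l : List Char) : List Int → Bool
  | [] => false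
  | k :: rest =>
    if PySem.Int.mod (l.length : Int) k == 0 then
      -- part_length = int(id_length / number_of_parts): truncating division, exact here since k ∣ n
      let p := PySem.Int.truncdiv (l.length : Int) k
      if (pvPartsSet l p k).length == 1 then true else pvALoop l rest
    else pvALoop l rest

def is_invalid_with_set (id : String) : Bool :=
  pvALoop id.toList (PySem.List.pyRange 2 ((id.toList.length : Int) + 1) 1)

-- ===== PORT B =====
def pvBLoop (l : List Char) : List Int → Bool
  | [] => false
  | p :: rest =>
    if PySem.Int.mod (l.length : Int) p == 0
        && PySem.List.slice l (some p) none == PySem.List.slice l none (some (-p)) then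
      true
    else pvBLoop l rest

def is_invalid_with_set_alt (id : String) : Bool :=
  pvBLoop id.toList (PySem.List.pyRange 1 (PySem.Int.floordiv (id.toList.length : Int) 2 + 1) 1)

-- ===== PRECONDITION & SPEC =====
def Spec_is_invalid_with_set (id : String) (out : Bool) : Prop := out = is_invalid_with_set_alt id
instance (id : String) (out : Bool) : Decidable (Spec_is_invalid_with_set id out) := by unfold Spec_is_invalid_with_set; infer_instance

-- ===== CLAIM (what is proved, stated in full; the proofs are below) =====
def Claim_equal_is_invalid_with_set : Prop := ∀ (id : String), Dom_is_invalid_with_set id → Spec_is_invalid_with_set id (is_invalid_with_set id)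

-- ===== LEMMAS AND PROOFS =====

-- "all parts equal the first part", in Nat form (pp = part length, kk = number of parts)
def pvAllParts (l : List Char) (pp kk : Nat) : Prop :=
  ∀ i : Nat, 1 ≤ i → i < kk → (l.drop (pp * i)).take pp = l.take pp

lemma pv_rep (pp : Nat) : ∀ (kk : Nat) (l : List Char), l.length = pp * kk →
    pvAllParts l pp kk → l = (List.replicate kk (l.take pp)).flatten := by
  intro kk
  induction kk with
  | zero =>
      intro l hlen _
      simp at hlen
      simp [hlen]
  | succ kk ih =>
      intro l hlen hparts
      rcases Nat.eq_zero_or_pos kk with rfl | hkpos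
      · have : l.take pp = l := List.take_of_length_le (by omega)
        simp [this]
      · have h1 : (l.drop pp).take pp = l.take pp := by
          have := hparts 1 le_rfl (by omega)
          simpa using this
        have hlen' : (l.drop pp).length = pp * kk := by
          simp [hlen]; ring_nf; omega
        have hparts' : pvAllParts (l.drop pp) pp kk := by
          intro i h1i hik
          rw [List.drop_drop]
          have := hparts (i + 1) (by omega) (by omega)
          have harith : pp * i + pp = pp * (i + 1) := by ring
          rw [show pp + pp * i = pp * (i + 1) by ring, this, h1]
        have hrec := ih (l.drop pp) hlen' hparts'
        rw [h1] at hrec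
        calc l = l.take pp ++ l.drop pp := (List.take_append_drop pp l).symm
          _ = l.take pp ++ (List.replicate kk (l.take pp)).flatten := by rw [← hrec]
          _ = (List.replicate (kk + 1) (l.take pp)).flatten := by
              rw [List.replicate_succ, List.flatten_cons]

lemma pv_core (l : List Char) (pp kk : Nat) (hl : l.length = pp * kk) (hpp : 1 ≤ pp)
    (hkk : 2 ≤ kk) :
    pvAllParts l pp kk ↔ l.drop pp = l.take (l.length - pp) := by
  constructor
  · intro hparts
    have hrep := pv_rep pp kk l hl hparts
    have hppn : pp ≤ l.length := by
      rw [hl]; exact Nat.le_mul_of_pos_right pp (by omega)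
    have hfl : (l.take pp).length = pp := by
      rw [List.length_take]; omega
    have hkk1 : kk = (kk - 1) + 1 := by omega
    have hsplit1 : l = l.take pp ++ (List.replicate (kk - 1) (l.take pp)).flatten := by
      conv_lhs => rw [hrep, hkk1]
      rw [List.replicate_succ, List.flatten_cons]
    have hsplit2 : l = (List.replicate (kk - 1) (l.take pp)).flatten ++ l.take pp := by
      conv_lhs => rw [hrep, hkk1]
      rw [List.replicate_succ', List.flatten_append]
      simp
    have hflatlen : ((List.replicate (kk - 1) (l.take pp)).flatten).length = pp * (kk - 1) := by
      simp [hfl, Nat.mul_comm]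
    have hdrop : l.drop pp = (List.replicate (kk - 1) (l.take pp)).flatten := by
      conv_lhs => rw [hsplit1]
      exact List.drop_left' hfl
    have hnp : l.length - pp = pp * (kk - 1) := by
      rw [hl]
      cases kk with
      | zero => omega
      | succ m => simp [Nat.mul_succ]
    have htake : l.take (l.length - pp) = (List.replicate (kk - 1) (l.take pp)).flatten := by
      rw [hnp]
      conv_lhs => rw [hsplit2]
      exact List.take_left' hflatlen
    rw [hdrop, htake]
  · intro hshift
    have key : ∀ i : Nat, i < kk → (l.drop (pp * i)).take pp = l.take pp := by
      intro i
      induction i with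
      | zero => simp
      | succ i ih =>
          intro hik
          have hi : i < kk := by omega
          have h1 : l.drop (pp * (i + 1)) = (l.drop pp).drop (pp * i) := by
            rw [List.drop_drop]; ring_nf
          rw [h1, hshift, List.drop_take]
          have hmin : pp ≤ l.length - pp - pp * i := by
            have h2 : pp * (i + 2) ≤ pp * kk := Nat.mul_le_mul_left pp (by omega)
            have h3 : pp * (i + 2) = pp * i + pp + pp := by ring
            rw [hl]; omega
          rw [List.take_take, min_eq_left hmin]
          exact ih hi
    intro i _ hik
    exact key i hik

lemma length_le_foldl_add {α : Type} [BEq α] (xs : List α) (s : PySem.Set α) :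
    s.length ≤ (xs.foldl PySem.Set.add s).length := by
  induction xs generalizing s with
  | nil => simp
  | cons x rest ih =>
      refine le_trans ?_ (ih (PySem.Set.add s x))
      simp only [PySem.Set.add]
      split <;> simp

lemma foldl_add_length_eq_iff {α : Type} [BEq α] (xs : List α) (s : PySem.Set α) :
    ((xs.foldl PySem.Set.add s).length = s.length) ↔ ∀ x ∈ xs, PySem.Set.contains s x = true := by
  induction xs generalizing s with
  | nil => simp
  | cons x rest ih =>
      simp only [List.foldl_cons, List.mem_cons]
      by_cases hc : PySem.Set.contains s x = true
      · have hc' : List.contains s x = true := hc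
        have : PySem.Set.add s x = s := by simp [PySem.Set.add, PySem.Set.contains, hc']
        rw [this, ih]
        constructor
        · rintro h y (rfl | hy)
          · exact hc
          · exact h y hy
        · intro h y hy; exact h y (Or.inr hy)
      · have hc' : List.contains s x = false := by
          have := hc
          simp only [PySem.Set.contains] at this
          exact Bool.not_eq_true _ |>.mp this
        have hadd : PySem.Set.add s x = s ++ [x] := by simp [PySem.Set.add, PySem.Set.contains, hc']
        rw [hadd]
        constructor
        · intro h
          exfalso
          have := length_le_foldl_add rest (s ++ [x])
          simp only [List.length_append, List.length_cons, List.length_nil] at this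
          omega
        · intro h
          exact absurd (h x (Or.inl rfl)) hc

lemma contains_single (a x : List Char) :
    PySem.Set.contains (PySem.Set.ofList [a]) x = true ↔ x = a := by
  show List.contains (PySem.Set.ofList [a]) x = true ↔ x = a
  have : (PySem.Set.ofList [a] : List (List Char)) = [a] := rfl
  rw [this]
  simp [eq_comm]

lemma partsSet_len_one_iff (l : List Char) (p k : Int) :
    ((pvPartsSet l p k).length = 1) ↔
      ∀ i ∈ PySem.List.pyRange 1 k 1,
        PySem.List.slice l (some (p * i)) (some (p * (i + 1))) = PySem.List.slice l none (some p) := by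
  have h0 : (PySem.Set.ofList [PySem.List.slice l none (some p)] : List (List Char)).length = 1 := rfl
  have hfold : pvPartsSet l p k
      = ((PySem.List.pyRange 1 k 1).map
          (fun i => PySem.List.slice l (some (p * i)) (some (p * (i + 1))))).foldl
            PySem.Set.add (PySem.Set.ofList [PySem.List.slice l none (some p)]) := by
    rw [List.foldl_map]
    rfl
  rw [pvPartsSet] at hfold ⊢
  rw [hfold, show (1 : Nat) = (PySem.Set.ofList [PySem.List.slice l none (some p)] : List (List Char)).length from h0.symm,
    foldl_add_length_eq_iff]
  constructor
  · intro h i hi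
    exact (contains_single _ _).mp (h _ (List.mem_map_of_mem hi))
  · intro h x hx
    rcases List.mem_map.mp hx with ⟨i, hi, rfl⟩
    exact (contains_single _ _).mpr (h i hi)

lemma pvALoop_eq_any (l : List Char) (ks : List Int) :
    pvALoop l ks = ks.any (fun k =>
      (PySem.Int.mod (l.length : Int) k == 0)
        && ((pvPartsSet l (PySem.Int.truncdiv (l.length : Int) k) k).length == 1)) := by
  induction ks with
  | nil => rfl
  | cons k rest ih =>
      simp only [pvALoop, List.any_cons, ← ih]
      by_cases h1 : PySem.Int.mod (l.length : Int) k == 0 <;>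
        by_cases h2 : (pvPartsSet l (PySem.Int.truncdiv (l.length : Int) k) k).length == 1 <;>
        simp [h1, h2]

lemma pvBLoop_eq_any (l : List Char) (ps : List Int) :
    pvBLoop l ps = ps.any (fun p =>
      PySem.Int.mod (l.length : Int) p == 0
        && PySem.List.slice l (some p) none == PySem.List.slice l none (some (-p))) := by
  induction ps with
  | nil => rfl
  | cons p rest ih =>
      simp only [pvBLoop, List.any_cons, ← ih]
      by_cases h : (PySem.Int.mod (l.length : Int) p == 0
        && PySem.List.slice l (some p) none == PySem.List.slice l none (some (-p))) = true <;>
        simp [h]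

lemma slice_part (l : List Char) (pp ii : Nat) :
    PySem.List.slice l (some ((pp : Int) * (ii : Int))) (some ((pp : Int) * ((ii : Int) + 1)))
      = (l.drop (pp * ii)).take pp := by
  have h1 : ((pp : Int) * (ii : Int)) = ((pp * ii : Nat) : Int) := by push_cast; ring
  have h2 : ((pp : Int) * ((ii : Int) + 1)) = ((pp * ii + pp : Nat) : Int) := by push_cast; ring
  rw [h1, h2, PySem.List.slice_natCast]
  congr 1
  omega

lemma pvA_iff (id : String) :
    is_invalid_with_set id = true ↔
      ∃ kk : Nat, 2 ≤ kk ∧ kk ≤ id.toList.length ∧ kk ∣ id.toList.length ∧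
        pvAllParts id.toList (id.toList.length / kk) kk := by
  rw [is_invalid_with_set, pvALoop_eq_any, List.any_eq_true]
  constructor
  · rintro ⟨k, hk, hcond⟩
    rw [PySem.List.mem_pyRange_one] at hk
    obtain ⟨hk2, hklt⟩ := hk
    lift k to Nat using (by omega) with kk
    rw [Bool.and_eq_true, beq_iff_eq, beq_iff_eq] at hcond
    obtain ⟨hmod, hset⟩ := hcond
    have hdvd : kk ∣ id.toList.length := by
      rw [PySem.Int.mod_eq_zero_iff_dvd] at hmod
      exact_mod_cast hmod
    have htd : PySem.Int.truncdiv (id.toList.length : Int) (kk : Int)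
        = ((id.toList.length / kk : Nat) : Int) := rfl
    rw [htd, partsSet_len_one_iff] at hset
    refine ⟨kk, by exact_mod_cast hk2, by exact_mod_cast (by omega : (kk : Int) ≤ id.toList.length), hdvd, ?_⟩
    intro ii h1 hik
    have hmem : ((ii : Int)) ∈ PySem.List.pyRange 1 (kk : Int) 1 := by
      rw [PySem.List.mem_pyRange_one]
      exact ⟨by exact_mod_cast h1, by exact_mod_cast hik⟩
    have := hset _ hmem
    rw [slice_part, PySem.List.slice_to_natCast] at this
    exact this
  · rintro ⟨kk, hk2, hkn, hdvd, hparts⟩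
    refine ⟨(kk : Int), ?_, ?_⟩
    · rw [PySem.List.mem_pyRange_one]
      constructor
      · exact_mod_cast hk2
      · have : (kk : Int) ≤ (id.toList.length : Int) := by exact_mod_cast hkn
        omega
    · rw [Bool.and_eq_true, beq_iff_eq, beq_iff_eq]
      constructor
      · rw [PySem.Int.mod_eq_zero_iff_dvd]
        exact_mod_cast hdvd
      · have htd : PySem.Int.truncdiv (id.toList.length : Int) (kk : Int)
            = ((id.toList.length / kk : Nat) : Int) := rfl
        rw [htd, partsSet_len_one_iff]
        intro i hi
        rw [PySem.List.mem_pyRange_one] at hi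
        obtain ⟨hi1, hik⟩ := hi
        lift i to Nat using (by omega) with ii
        rw [slice_part, PySem.List.slice_to_natCast]
        exact hparts ii (by exact_mod_cast hi1) (by exact_mod_cast hik)

lemma pvB_iff (id : String) :
    is_invalid_with_set_alt id = true ↔
      ∃ pp : Nat, 1 ≤ pp ∧ pp ≤ id.toList.length / 2 ∧ pp ∣ id.toList.length ∧
        id.toList.drop pp = id.toList.take (id.toList.length - pp) := by
  rw [is_invalid_with_set_alt, pvBLoop_eq_any, List.any_eq_true]
  have hfd : PySem.Int.floordiv (id.toList.length : Int) 2 = ((id.toList.length / 2 : Nat) : Int) :=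
    by exact_mod_cast PySem.Int.floordiv_natCast id.toList.length 2
  constructor
  · rintro ⟨p, hp, hcond⟩
    rw [PySem.List.mem_pyRange_one, hfd] at hp
    obtain ⟨hp1, hplt⟩ := hp
    lift p to Nat using (by omega) with pp
    rw [Bool.and_eq_true, beq_iff_eq, beq_iff_eq] at hcond
    obtain ⟨hmod, hsl⟩ := hcond
    rw [PySem.List.slice_from_natCast,
      PySem.List.slice_to_neg_natCast id.toList pp (by exact_mod_cast hp1)] at hsl
    exact ⟨pp, by exact_mod_cast hp1, by exact_mod_cast (by omega : (pp : Int) ≤ (id.toList.length / 2 : Nat)), by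
      rw [PySem.Int.mod_eq_zero_iff_dvd] at hmod
      exact_mod_cast hmod, hsl⟩
  · rintro ⟨pp, hp1, hpn2, hdvd, hshift⟩
    refine ⟨(pp : Int), ?_, ?_⟩
    · rw [PySem.List.mem_pyRange_one, hfd]
      constructor
      · exact_mod_cast hp1
      · have : (pp : Int) ≤ ((id.toList.length / 2 : Nat) : Int) := by exact_mod_cast hpn2
        omega
    · rw [Bool.and_eq_true, beq_iff_eq, beq_iff_eq]
      refine ⟨by rw [PySem.Int.mod_eq_zero_iff_dvd]; exact_mod_cast hdvd, ?_⟩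
      rw [PySem.List.slice_from_natCast,
        PySem.List.slice_to_neg_natCast id.toList pp hp1]
      exact hshift

lemma pv_exists_iff (l : List Char) :
    (∃ kk : Nat, 2 ≤ kk ∧ kk ≤ l.length ∧ kk ∣ l.length ∧ pvAllParts l (l.length / kk) kk) ↔
      (∃ pp : Nat, 1 ≤ pp ∧ pp ≤ l.length / 2 ∧ pp ∣ l.length ∧
        l.drop pp = l.take (l.length - pp)) := by
  constructor
  · rintro ⟨kk, hk2, hkn, hdvd, hparts⟩
    have hpos : 0 < l.length / kk := Nat.div_pos hkn (by omega)
    refine ⟨l.length / kk, hpos, Nat.div_le_div_left hk2 (by omega),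
      Nat.div_dvd_of_dvd hdvd, ?_⟩
    have hmul : l.length / kk * kk = l.length := Nat.div_mul_cancel hdvd
    exact (pv_core l (l.length / kk) kk (by omega) hpos hk2).mp hparts
  · rintro ⟨pp, hp1, hpn2, hdvd, hshift⟩
    have h2p : 2 * pp ≤ l.length := by
      have := Nat.div_mul_le_self l.length 2
      omega
    have hkk2 : 2 ≤ l.length / pp := (Nat.le_div_iff_mul_le (by omega)).mpr (by omega)
    refine ⟨l.length / pp, hkk2, Nat.div_le_self _ pp, Nat.div_dvd_of_dvd hdvd, ?_⟩
    have hdd : l.length / (l.length / pp) = pp := Nat.div_div_self hdvd (by omega)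
    rw [hdd]
    have hmul : pp * (l.length / pp) = l.length := Nat.mul_div_cancel' hdvd
    exact (pv_core l pp (l.length / pp) (by omega) hp1 hkk2).mpr hshift

-- ===== VERDICT (by name: the statement is the Claim_ definition above) =====
theorem is_invalid_with_set_spec : Claim_equal_is_invalid_with_set := by
  intro id _
  unfold Spec_is_invalid_with_set
  have main : is_invalid_with_set id = true ↔ is_invalid_with_set_alt id = true := by
    rw [pvA_iff, pvB_iff]
    exact pv_exists_iff id.toList
  cases hA : is_invalid_with_set id <;> cases hB : is_invalid_with_set_alt id <;> simp_all
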